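-- pv_equiv track=rewrite | github.com/Sreyan88/BioAug | preprocess.py | join_entities
-- ===== SOURCE A (Python) =====
-- def join_entities(sentence, named_entities, pos_tags, entities):
--     new_sentence, new_named_entities, new_pos_tags, new_entities = [], [], [], []
--     cur_sentence, cur_named_entities, cur_pos_tags, cur_entities = [], [], [], []
--
--     for i in range(len(sentence)):
--         if entities[i]=='B':
--             if len(cur_sentence):
--                 if "B-I" in cur_named_entities or "I-I" in cur_named_entities or "B-O" in cur_named_entities or "I-O" in cur_named_entities or "B-P" in cur_named_entities or "I-P" in cur_named_entities:
--                     new_sentence += cur_sentence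
--                     new_named_entities += cur_named_entities
--                     new_pos_tags += cur_pos_tags
--                     new_entities += ['O']*len(cur_entities)
--                 else:
--                     new_sentence.append(' '.join(cur_sentence))
--                     new_named_entities.append(' '.join(cur_named_entities))
--                     new_pos_tags.append(' '.join(cur_pos_tags))
--                     new_entities.append(' '.join(cur_entities))
--
--             cur_sentence, cur_named_entities, cur_pos_tags, cur_entities = [], [], [], []
--
--             cur_sentence.append(sentence[i])
--             cur_named_entities.append(named_entities[i])
--             cur_pos_tags.append(pos_tags[i])
--             cur_entities.append(entities[i])
--         elif entities[i]=='I':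
--             cur_sentence.append(sentence[i])
--             cur_named_entities.append(named_entities[i])
--             cur_pos_tags.append(pos_tags[i])
--             cur_entities.append(entities[i])
--         else:
--             if len(cur_sentence):
--                 if "B-I" in cur_named_entities or "I-I" in cur_named_entities or "B-O" in cur_named_entities or "I-O" in cur_named_entities or "B-P" in cur_named_entities or "I-P" in cur_named_entities:
--                     new_sentence += cur_sentence
--                     new_named_entities += cur_named_entities
--                     new_pos_tags += cur_pos_tags
--                     new_entities += ['O']*len(cur_entities)
--                 else:
--                     new_sentence.append(' '.join(cur_sentence))
--                     new_named_entities.append(' '.join(cur_named_entities))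
--                     new_pos_tags.append(' '.join(cur_pos_tags))
--                     new_entities.append(' '.join(cur_entities))
--
--             cur_sentence, cur_named_entities, cur_pos_tags, cur_entities = [], [], [], []
--
--             new_sentence.append(sentence[i])
--             new_named_entities.append(named_entities[i])
--             new_pos_tags.append(pos_tags[i])
--             new_entities.append(entities[i])
--
--     if len(cur_sentence):
--         if "B-I" in cur_named_entities or "I-I" in cur_named_entities or "B-O" in cur_named_entities or "I-O" in cur_named_entities or "B-P" in cur_named_entities or "I-P" in cur_named_entities:
--             new_sentence += cur_sentence
--             new_named_entities += cur_named_entities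
--             new_pos_tags += cur_pos_tags
--             new_entities += ['O']*len(cur_entities)
--         else:
--             new_sentence.append(' '.join(cur_sentence))
--             new_named_entities.append(' '.join(cur_named_entities))
--             new_pos_tags.append(' '.join(cur_pos_tags))
--             new_entities.append(' '.join(cur_entities))
--
--     return new_sentence, new_named_entities, new_pos_tags, new_entities
-- ===== SOURCE B (Python) =====
-- BAD_TAGS = {"B-I", "I-I", "B-O", "I-O", "B-P", "I-P"}
--
-- def join_entities(sentence, named_entities, pos_tags, entities):
--     # pass 1: segment the indices into standalone tokens and maximal B/I groups
--     segments = []            # items: ('single', i) or ('group', [i, ...])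
--     pending = []             # indices of the group being built
--     for i in range(len(sentence)):
--         tag = entities[i]
--         if tag == 'I':
--             pending.append(i)
--         elif tag == 'B':
--             if pending:
--                 segments.append(('group', pending))
--             pending = [i]
--         else:
--             if pending:
--                 segments.append(('group', pending))
--             pending = []
--             segments.append(('single', i))
--     if pending:
--         segments.append(('group', pending))
--
--     # pass 2: emit each segment
--     new_sentence, new_named_entities, new_pos_tags, new_entities = [], [], [], []
--     for kind, val in segments:
--         if kind == 'single':
--             new_sentence.append(sentence[val])
--             new_named_entities.append(named_entities[val])
--             new_pos_tags.append(pos_tags[val])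
--             new_entities.append(entities[val])
--         elif any(named_entities[j] in BAD_TAGS for j in val):
--             new_sentence += [sentence[j] for j in val]
--             new_named_entities += [named_entities[j] for j in val]
--             new_pos_tags += [pos_tags[j] for j in val]
--             new_entities += ['O' for _ in val]
--         else:
--             new_sentence.append(' '.join(sentence[j] for j in val))
--             new_named_entities.append(' '.join(named_entities[j] for j in val))
--             new_pos_tags.append(' '.join(pos_tags[j] for j in val))
--             new_entities.append(' '.join(entities[j] for j in val))
--     return new_sentence, new_named_entities, new_pos_tags, new_entities
-- ===== Notes on version B (the rewrite author's own statement) =====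
-- stated objective: alternative
-- what changed: Replaces A's single pass with four parallel current-buffer lists and a thrice-duplicated flush block by a two-pass decomposition: pass 1 partitions indices into standalone tokens and maximal B/I index groups, pass 2 emits each segment (spread or join) once.
import Mathlib
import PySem

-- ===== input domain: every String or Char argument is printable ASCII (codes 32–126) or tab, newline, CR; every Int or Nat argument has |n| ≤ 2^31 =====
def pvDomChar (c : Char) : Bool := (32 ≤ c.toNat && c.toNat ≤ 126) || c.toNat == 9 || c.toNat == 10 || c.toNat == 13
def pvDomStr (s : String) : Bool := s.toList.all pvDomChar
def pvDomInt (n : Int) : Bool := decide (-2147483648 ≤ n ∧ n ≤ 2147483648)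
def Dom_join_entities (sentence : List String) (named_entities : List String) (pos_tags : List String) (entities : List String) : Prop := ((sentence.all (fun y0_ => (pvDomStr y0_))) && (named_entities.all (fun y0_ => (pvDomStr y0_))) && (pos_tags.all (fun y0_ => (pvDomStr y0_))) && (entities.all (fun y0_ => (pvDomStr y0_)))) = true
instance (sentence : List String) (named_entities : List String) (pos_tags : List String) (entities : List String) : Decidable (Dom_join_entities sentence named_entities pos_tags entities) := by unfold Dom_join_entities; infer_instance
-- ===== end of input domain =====

-- B replaces A's one-pass loop over four parallel current buffers (its flush block written three
-- times) by a two-pass decomposition: segment the indices first, then emit each segment once.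

-- ===== PORT A =====
abbrev PvT4 := List String × List String × List String × List String

def pvBadA (cn : List String) : Bool :=
  cn.contains "B-I" || cn.contains "I-I" || cn.contains "B-O" || cn.contains "I-O" ||
  cn.contains "B-P" || cn.contains "I-P"

-- the `if len(cur_sentence): …` flush block of A (it appears three times in the Python)
def pvFlushA (new cur : PvT4) : PvT4 :=
  if cur.1.isEmpty then new
  else if pvBadA cur.2.1 then
    (new.1 ++ cur.1, new.2.1 ++ cur.2.1, new.2.2.1 ++ cur.2.2.1,
     new.2.2.2 ++ List.replicate cur.2.2.2.length "O")
  else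
    (new.1 ++ [PySem.Str.join " " cur.1], new.2.1 ++ [PySem.Str.join " " cur.2.1],
     new.2.2.1 ++ [PySem.Str.join " " cur.2.2.1], new.2.2.2 ++ [PySem.Str.join " " cur.2.2.2])

-- one iteration of A's `for i in range(len(sentence))` loop; state = (new lists, cur lists)
def pvStepA (S N P E : List String) (st : PvT4 × PvT4) (i : Nat) : PvT4 × PvT4 :=
  if E.getD i "" = "B" then
    (pvFlushA st.1 st.2, ([S.getD i ""], [N.getD i ""], [P.getD i ""], [E.getD i ""]))
  else if E.getD i "" = "I" then
    (st.1, (st.2.1 ++ [S.getD i ""], st.2.2.1 ++ [N.getD i ""],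
            st.2.2.2.1 ++ [P.getD i ""], st.2.2.2.2 ++ [E.getD i ""]))
  else
    (((pvFlushA st.1 st.2).1 ++ [S.getD i ""], (pvFlushA st.1 st.2).2.1 ++ [N.getD i ""],
      (pvFlushA st.1 st.2).2.2.1 ++ [P.getD i ""], (pvFlushA st.1 st.2).2.2.2 ++ [E.getD i ""]),
     ([], [], [], []))

def join_entities (sentence : List String) (named_entities : List String) (pos_tags : List String) (entities : List String) : List String × List String × List String × List String :=
  pvFlushA
    ((List.range sentence.length).foldl
      (pvStepA sentence named_entities pos_tags entities) (([], [], [], []), ([], [], [], []))).1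
    ((List.range sentence.length).foldl
      (pvStepA sentence named_entities pos_tags entities) (([], [], [], []), ([], [], [], []))).2

-- ===== PORT B =====
inductive PvSeg where
  | single : Nat → PvSeg
  | group : List Nat → PvSeg
deriving DecidableEq, Repr

def pvBadSet : PySem.Set String := PySem.Set.ofList ["B-I", "I-I", "B-O", "I-O", "B-P", "I-P"]

-- pass 1 step: partition the indices into standalone tokens and maximal B/I groups
def pvSegStep (E : List String) (st : List PvSeg × List Nat) (i : Nat) : List PvSeg × List Nat :=
  if E.getD i "" = "I" then (st.1, st.2 ++ [i])
  else if E.getD i "" = "B" then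
    ((if st.2.isEmpty then st.1 else st.1 ++ [PvSeg.group st.2]), [i])
  else
    ((if st.2.isEmpty then st.1 else st.1 ++ [PvSeg.group st.2]) ++ [PvSeg.single i], [])

def pvSegments (E : List String) (n : Nat) : List PvSeg :=
  if ((List.range n).foldl (pvSegStep E) ([], [])).2.isEmpty then
    ((List.range n).foldl (pvSegStep E) ([], [])).1
  else
    ((List.range n).foldl (pvSegStep E) ([], [])).1 ++
      [PvSeg.group ((List.range n).foldl (pvSegStep E) ([], [])).2]

-- pass 2 step: emit one segment (spread it if a bad tag occurs in it, else join it)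
def pvEmitSeg (S N P E : List String) (out : PvT4) (sg : PvSeg) : PvT4 :=
  match sg with
  | .single i =>
      (out.1 ++ [S.getD i ""], out.2.1 ++ [N.getD i ""],
       out.2.2.1 ++ [P.getD i ""], out.2.2.2 ++ [E.getD i ""])
  | .group js =>
      if js.any (fun j => PySem.Set.contains pvBadSet (N.getD j "")) then
        (out.1 ++ js.map (fun j => S.getD j ""), out.2.1 ++ js.map (fun j => N.getD j ""),
         out.2.2.1 ++ js.map (fun j => P.getD j ""), out.2.2.2 ++ js.map (fun _ => "O"))
      else
        (out.1 ++ [PySem.Str.join " " (js.map (fun j => S.getD j ""))],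
         out.2.1 ++ [PySem.Str.join " " (js.map (fun j => N.getD j ""))],
         out.2.2.1 ++ [PySem.Str.join " " (js.map (fun j => P.getD j ""))],
         out.2.2.2 ++ [PySem.Str.join " " (js.map (fun j => E.getD j ""))])

def join_entities_alt (sentence : List String) (named_entities : List String) (pos_tags : List String) (entities : List String) : List String × List String × List String × List String :=
  (pvSegments entities sentence.length).foldl
    (pvEmitSeg sentence named_entities pos_tags entities) ([], [], [], [])

-- ===== PRECONDITION & SPEC =====
-- Pre_ excludes exactly the inputs on which Python A raises IndexError: a companion list
-- shorter than `sentence` (the loop indexes all four lists at every i < len(sentence)).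
def Pre_join_entities (sentence : List String) (named_entities : List String) (pos_tags : List String) (entities : List String) : Prop :=
  sentence.length ≤ named_entities.length ∧ sentence.length ≤ pos_tags.length ∧
  sentence.length ≤ entities.length
instance (sentence : List String) (named_entities : List String) (pos_tags : List String) (entities : List String) : Decidable (Pre_join_entities sentence named_entities pos_tags entities) := by unfold Pre_join_entities; infer_instance

def pvWitness_join_entities : List String × List String × List String × List String :=
  (["John", "Smith", "ran"], ["B-PER", "I-PER", "O"], ["NNP", "NNP", "VBD"], ["B", "I", "O"])

def Spec_join_entities (sentence : List String) (named_entities : List String) (pos_tags : List String) (entities : List String) (out : List String × List String × List String × List String) : Prop := out = join_entities_alt sentence named_entities pos_tags entities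
instance (sentence : List String) (named_entities : List String) (pos_tags : List String) (entities : List String) (out : List String × List String × List String × List String) : Decidable (Spec_join_entities sentence named_entities pos_tags entities out) := by unfold Spec_join_entities; infer_instance

-- ===== CLAIM (what is proved, stated in full; the proofs are below) =====
def Claim_equal_join_entities : Prop := ∀ (sentence : List String) (named_entities : List String) (pos_tags : List String) (entities : List String), Dom_join_entities sentence named_entities pos_tags entities → Pre_join_entities sentence named_entities pos_tags entities → Spec_join_entities sentence named_entities pos_tags entities (join_entities sentence named_entities pos_tags entities)

-- ===== LEMMAS AND PROOFS =====

-- A's six membership tests over the current named-entity buffer = B's `any` over the bad-tag set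
lemma pvBadA_eq_any (l : List String) :
    pvBadA l = l.any (fun t => PySem.Set.contains pvBadSet t) := by
  rw [Bool.eq_iff_iff]
  simp only [pvBadA, Bool.or_eq_true, List.any_eq_true, List.contains_iff_mem]
  constructor
  · rintro (((((h|h)|h)|h)|h)|h) <;> exact ⟨_, h, by decide⟩
  · rintro ⟨t, ht, hc⟩
    have h2 : t ∈ (["B-I", "I-I", "B-O", "I-O", "B-P", "I-P"] : List String) := by
      simpa [pvBadSet, PySem.Set.mem_ofList] using hc
    simp only [List.mem_cons, List.not_mem_nil, or_false] at h2
    rcases h2 with rfl|rfl|rfl|rfl|rfl|rfl <;> tauto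

-- A's current buffers when the pending index group is `js`
def pvCurOf (S N P E : List String) (js : List Nat) : PvT4 :=
  (js.map (S.getD · ""), js.map (N.getD · ""), js.map (P.getD · ""), js.map (E.getD · ""))

def pvEmitAll (S N P E : List String) (segs : List PvSeg) : PvT4 :=
  segs.foldl (pvEmitSeg S N P E) ([], [], [], [])

lemma pvEmitAll_append (S N P E : List String) (segs : List PvSeg) (sg : PvSeg) :
    pvEmitAll S N P E (segs ++ [sg]) = pvEmitSeg S N P E (pvEmitAll S N P E segs) sg := by
  simp [pvEmitAll, List.foldl_append]

-- A's flush of buffers holding the tokens of index group `js` = B's emission of that group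
lemma pvFlush_eq_emit (S N P E : List String) (new : PvT4) (js : List Nat) :
    pvFlushA new (pvCurOf S N P E js)
      = if js.isEmpty then new else pvEmitSeg S N P E new (PvSeg.group js) := by
  unfold pvFlushA pvCurOf pvEmitSeg
  simp only [List.isEmpty_map]
  rw [pvBadA_eq_any, List.any_map]
  simp only [Function.comp_def, List.map_const', List.length_map]

-- loop invariant: A's fold state is determined by B's (segments, pending) fold state
lemma pvLoop_inv (S N P E : List String) (is : List Nat) :
    ∀ (segs : List PvSeg) (pending : List Nat),
      is.foldl (pvStepA S N P E) (pvEmitAll S N P E segs, pvCurOf S N P E pending)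
        = (pvEmitAll S N P E (is.foldl (pvSegStep E) (segs, pending)).1,
           pvCurOf S N P E (is.foldl (pvSegStep E) (segs, pending)).2) := by
  induction is with
  | nil => intro segs pending; rfl
  | cons i t ih =>
    intro segs pending
    have hstep : pvStepA S N P E (pvEmitAll S N P E segs, pvCurOf S N P E pending) i
        = (pvEmitAll S N P E ((pvSegStep E (segs, pending) i).1),
           pvCurOf S N P E ((pvSegStep E (segs, pending) i).2)) := by
      by_cases hB : E.getD i "" = "B"
      · have hnotI : ¬ (E.getD i "" = "I") := by rw [hB]; decide
        simp only [pvStepA, pvSegStep, if_pos hB, if_neg hnotI]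
        rw [pvFlush_eq_emit]
        by_cases hp : pending.isEmpty
        · rw [if_pos hp, if_pos hp]; rfl
        · rw [if_neg hp, if_neg hp, pvEmitAll_append]; rfl
      · by_cases hI : E.getD i "" = "I"
        · simp only [pvStepA, pvSegStep, if_neg hB, if_pos hI]
          simp only [pvCurOf, List.map_append, List.map_cons, List.map_nil]
        · simp only [pvStepA, pvSegStep, if_neg hB, if_neg hI]
          rw [pvFlush_eq_emit]
          by_cases hp : pending.isEmpty
          · rw [if_pos hp, if_pos hp, pvEmitAll_append]; rfl
          · rw [if_neg hp, if_neg hp, pvEmitAll_append, pvEmitAll_append]; rfl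
    rw [List.foldl_cons, List.foldl_cons, hstep, ih]

-- ===== VERDICT (by name: the statement is the Claim_ definition above) =====
theorem join_entities_spec : Claim_equal_join_entities := by
  intro S N P E _hDom _hPre
  unfold Spec_join_entities join_entities join_entities_alt pvSegments
  rw [show ((([], [], [], []), ([], [], [], [])) : PvT4 × PvT4)
      = (pvEmitAll S N P E [], pvCurOf S N P E []) from rfl]
  rw [pvLoop_inv]
  rw [pvFlush_eq_emit]
  by_cases hp : ((List.range S.length).foldl (pvSegStep E) ([], [])).2.isEmpty
  · rw [if_pos hp, if_pos hp]; rfl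
  · rw [if_neg hp, if_neg hp]
    exact (pvEmitAll_append S N P E _ _).symm
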